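-- pv_equiv track=rewrite | github.com/Rishabh5903/Competitive_Programming | Codeforces/contest 918 div 4/e.py | has_subarray_with_equal_alternating_sum
-- ===== SOURCE A (Python) =====
-- def has_subarray_with_equal_alternating_sum(arr):
--     even_sum = 0
--     odd_sum = 0
--     prefix_sum = [0]
--
--     for i, num in enumerate(arr):
--         if i % 2 == 0:
--             even_sum += num
--         else:
--             odd_sum += num
--         prefix_sum.append(even_sum - odd_sum)
--
--     seen = set()
--     for num in prefix_sum:
--         if num in seen:
--             return True
--         seen.add(num)
--
--     return False
-- ===== SOURCE B (Python) =====
-- def has_subarray_with_equal_alternating_sum(arr):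
--     # single sign-toggling accumulator for the prefix alternating sums,
--     # then sort-and-adjacent-compare duplicate detection
--     prefix = [0]
--     sign = 1
--     acc = 0
--     for num in arr:
--         acc += sign * num
--         sign = -sign
--         prefix.append(acc)
--     srt = sorted(prefix)
--     for i in range(1, len(srt)):
--         if srt[i - 1] == srt[i]:
--             return True
--     return False
-- ===== Notes on version B (the rewrite author's own statement) =====
-- stated objective: alternative
-- what changed: Replaces the two-counter (even_sum/odd_sum) prefix construction with a single sign-toggling accumulator, and replaces set-based duplicate detection with sorting the prefix list and scanning adjacent pairs for an equal neighbour.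
import Mathlib
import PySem

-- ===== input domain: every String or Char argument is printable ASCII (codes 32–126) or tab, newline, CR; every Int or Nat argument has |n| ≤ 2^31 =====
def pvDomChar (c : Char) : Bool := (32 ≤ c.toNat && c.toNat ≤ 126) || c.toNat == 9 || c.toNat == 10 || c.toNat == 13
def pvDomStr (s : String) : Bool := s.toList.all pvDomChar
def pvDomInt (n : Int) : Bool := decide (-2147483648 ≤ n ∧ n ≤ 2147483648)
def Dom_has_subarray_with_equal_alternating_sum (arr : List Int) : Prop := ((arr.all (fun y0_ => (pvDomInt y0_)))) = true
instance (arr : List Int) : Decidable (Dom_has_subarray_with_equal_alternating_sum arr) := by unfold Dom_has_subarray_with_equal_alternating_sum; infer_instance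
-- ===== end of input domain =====

-- B replaces A's two-counter prefix build with a sign-toggling accumulator and its
-- set-based duplicate scan with sort-then-adjacent-compare; same result, alternative algorithm.


-- ===== PORT A =====
-- the 'for i, num in enumerate(arr)' loop: state (i, even_sum, odd_sum, prefix_sum)
def pvABuild : List Int → Int → Int → Int → List Int → List Int
  | [], _, _, _, pre => pre
  | num :: rest, i, es, os, pre =>
    if i % 2 == 0 then pvABuild rest (i + 1) (es + num) os (pre ++ [(es + num) - os])
    else pvABuild rest (i + 1) es (os + num) (pre ++ [es - (os + num)])

-- the 'for num in prefix_sum' loop with the growing set 'seen'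
def pvAScan : List Int → PySem.Set Int → Bool
  | [], _ => false
  | num :: rest, seen =>
    if PySem.Set.contains seen num then true
    else pvAScan rest (PySem.Set.add seen num)

def has_subarray_with_equal_alternating_sum (arr : List Int) : Bool :=
  pvAScan (pvABuild arr 0 0 0 [0]) PySem.Set.empty

-- ===== PORT B =====
-- sign-toggling accumulator building the prefix alternating sums after the leading 0
def pvBPrefix : List Int → Int → Int → List Int
  | [], _, _ => []
  | num :: rest, sign, acc => (acc + sign * num) :: pvBPrefix rest (-sign) (acc + sign * num)

-- adjacent-pair scan of the sorted list
def pvBAdj : List Int → Bool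
  | x :: y :: rest => if x == y then true else pvBAdj (y :: rest)
  | _ => false

def has_subarray_with_equal_alternating_sum_alt (arr : List Int) : Bool :=
  pvBAdj (PySem.List.sorted (0 :: pvBPrefix arr 1 0) (fun x => x) false)

-- ===== PRECONDITION & SPEC =====
def Spec_has_subarray_with_equal_alternating_sum (arr : List Int) (out : Bool) : Prop := out = has_subarray_with_equal_alternating_sum_alt arr
instance (arr : List Int) (out : Bool) : Decidable (Spec_has_subarray_with_equal_alternating_sum arr out) := by unfold Spec_has_subarray_with_equal_alternating_sum; infer_instance

-- ===== CLAIM (what is proved, stated in full; the proofs are below) =====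
def Claim_equal_has_subarray_with_equal_alternating_sum : Prop := ∀ (arr : List Int), Dom_has_subarray_with_equal_alternating_sum arr → Spec_has_subarray_with_equal_alternating_sum arr (has_subarray_with_equal_alternating_sum arr)

-- ===== LEMMAS AND PROOFS =====

-- A's build produces exactly B's prefix list appended to the accumulator
theorem pvABuild_eq (arr : List Int) : ∀ (i es os : Int) (pre : List Int), 0 ≤ i →
    pvABuild arr i es os pre = pre ++ pvBPrefix arr (if i % 2 == 0 then 1 else -1) (es - os) := by
  induction arr with
  | nil => intro i es os pre _; simp [pvABuild, pvBPrefix]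
  | cons num rest ih =>
    intro i es os pre hi
    by_cases h : i % 2 = 0
    · have h2 : (i + 1) % 2 ≠ 0 := by omega
      simp only [pvABuild, pvBPrefix, h, beq_self_eq_true, if_true,
        ih (i + 1) (es + num) os _ (by omega), beq_iff_eq, h2, if_false]
      have : es + num - os = es - os + 1 * num := by ring
      rw [this]; simp
    · have h2 : (i + 1) % 2 = 0 := by omega
      simp only [pvABuild, pvBPrefix, beq_iff_eq, h, if_false,
        ih (i + 1) es (os + num) _ (by omega), h2, if_true]
      have h3 : es - (os + num) = es - os + -1 * num := by ring
      rw [h3]; simp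

-- A's seen-scan returns false exactly when the remaining list is duplicate-free and disjoint from seen
theorem pvAScan_false_iff (l : List Int) : ∀ (s : List Int),
    pvAScan l s = false ↔ l.Nodup ∧ ∀ x ∈ l, x ∉ s := by
  induction l with
  | nil => intro s; simp [pvAScan]
  | cons num rest ih =>
    intro s
    by_cases h : num ∈ s
    · have hc : PySem.Set.contains s num = true := (PySem.Set.contains_iff s num).mpr h
      constructor
      · intro hfalse; simp [pvAScan] at hfalse
        exact absurd h hfalse.1
      · rintro ⟨-, hdisj⟩; exact absurd h (hdisj num (List.mem_cons_self))
    · have hc : PySem.Set.contains s num = false := by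
        cases hcb : PySem.Set.contains s num
        · rfl
        · exact absurd ((PySem.Set.contains_iff s num).mp hcb) h
      simp only [pvAScan, hc, Bool.false_eq_true, if_false]
      rw [ih, List.nodup_cons]
      constructor
      · rintro ⟨hnd, hdisj⟩
        refine ⟨⟨fun hm => (hdisj num hm) (by rw [PySem.Set.mem_add]; exact Or.inr rfl), hnd⟩, ?_⟩
        intro x hx
        rcases List.mem_cons.mp hx with hx | hx
        · subst hx; exact h
        · intro hxs; exact hdisj x hx (by rw [PySem.Set.mem_add]; exact Or.inl hxs)
      · rintro ⟨⟨hnm, hnd⟩, hdisj⟩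
        refine ⟨hnd, fun x hx hxs => ?_⟩
        rcases (PySem.Set.mem_add s num x).mp hxs with h1 | h1
        · exact hdisj x (List.mem_cons_of_mem _ hx) h1
        · subst h1; exact hnm hx

-- adjacent-pair scan of a (≤)-sorted list finds an equal pair iff the list has a duplicate
theorem pvBAdj_true_iff (l : List Int) (hs : l.Pairwise (· ≤ ·)) :
    pvBAdj l = true ↔ ¬ l.Nodup := by
  induction l with
  | nil => simp [pvBAdj]
  | cons x t ih =>
    cases t with
    | nil => simp [pvBAdj]
    | cons y r =>
      have hs' : (y :: r).Pairwise (· ≤ ·) := hs.tail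
      by_cases hxy : x = y
      · subst hxy
        simp [pvBAdj, List.nodup_cons]
      · have hxy' : (x == y) = false := by simp [hxy]
        simp only [pvBAdj, hxy', Bool.false_eq_true, if_false]
        rw [ih hs']
        have hxnot : x ∉ y :: r := by
          intro hmem
          rcases List.mem_cons.mp hmem with hm | hm
          · exact hxy hm
          · have h1 : x ≤ y := (List.pairwise_cons.mp hs).1 y (List.mem_cons_self)
            have h2 : y ≤ x := (List.pairwise_cons.mp hs').1 x hm
            exact hxy (le_antisymm h1 h2)
        constructor
        · intro hnd hc
          rw [List.nodup_cons] at hc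
          exact hnd hc.2
        · intro hc hnd
          exact hc (List.nodup_cons.mpr ⟨hxnot, hnd⟩)

theorem portA_eq_nodup (arr : List Int) :
    has_subarray_with_equal_alternating_sum arr = !decide (0 :: pvBPrefix arr 1 0).Nodup := by
  unfold has_subarray_with_equal_alternating_sum
  rw [pvABuild_eq arr 0 0 0 [0] (by norm_num)]
  have hpre : ([0] : List Int) ++ pvBPrefix arr (if (0 : Int) % 2 == 0 then 1 else -1) (0 - 0)
      = 0 :: pvBPrefix arr 1 0 := by norm_num
  rw [hpre]
  by_cases hnd : (0 :: pvBPrefix arr 1 0).Nodup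
  · have hres : pvAScan (0 :: pvBPrefix arr 1 0) PySem.Set.empty = false := by
      rw [pvAScan_false_iff]
      exact ⟨hnd, fun x _ hx => by simp [PySem.Set.empty] at hx⟩
    rw [hres]; simp [hnd]
  · have hres : pvAScan (0 :: pvBPrefix arr 1 0) PySem.Set.empty = true := by
      cases hcb : pvAScan (0 :: pvBPrefix arr 1 0) PySem.Set.empty
      · exact absurd ((pvAScan_false_iff _ _).mp hcb).1 hnd
      · rfl
    rw [hres]; simp [hnd]

theorem portB_eq_nodup (arr : List Int) :
    has_subarray_with_equal_alternating_sum_alt arr = !decide (0 :: pvBPrefix arr 1 0).Nodup := by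
  unfold has_subarray_with_equal_alternating_sum_alt
  have hperm : (PySem.List.sorted (0 :: pvBPrefix arr 1 0) (fun x => x) false).Perm
      (0 :: pvBPrefix arr 1 0) := PySem.List.sorted_perm _ _ _
  have hpw : (PySem.List.sorted (0 :: pvBPrefix arr 1 0) (fun x => x) false).Pairwise (· ≤ ·) := by
    have := PySem.List.sorted_pairwise (xs := 0 :: pvBPrefix arr 1 0) (key := fun x => x)
    simpa using this
  by_cases hnd : (0 :: pvBPrefix arr 1 0).Nodup
  · have hnd' := hperm.nodup_iff.mpr hnd
    have hres : pvBAdj (PySem.List.sorted (0 :: pvBPrefix arr 1 0) (fun x => x) false) = false := by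
      cases hcb : pvBAdj (PySem.List.sorted (0 :: pvBPrefix arr 1 0) (fun x => x) false)
      · rfl
      · exact absurd ((pvBAdj_true_iff _ hpw).mp hcb) (not_not_intro hnd')
    rw [hres]; simp [hnd]
  · have hnd' : ¬ (PySem.List.sorted (0 :: pvBPrefix arr 1 0) (fun x => x) false).Nodup :=
      fun h => hnd (hperm.nodup_iff.mp h)
    have hres := (pvBAdj_true_iff _ hpw).mpr hnd'
    rw [hres]; simp [hnd]

-- ===== VERDICT (by name: the statement is the Claim_ definition above) =====
theorem has_subarray_with_equal_alternating_sum_spec : Claim_equal_has_subarray_with_equal_alternating_sum := by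
  intro arr _
  unfold Spec_has_subarray_with_equal_alternating_sum
  rw [portA_eq_nodup, portB_eq_nodup]
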